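-- pv_equiv track=rewrite | github.com/Dimaaap/Leetcode | Easy/914.)X of a Kind in a Desk of Cards.py | has_group_size_x
-- ===== SOURCE A (Python) =====
-- def has_group_size_x(deck: list[int]) -> bool:
--     """
--     You are given an integer array deck where deck[i] represents the number written on the ith card.
--
--     Partition the cards into one or more groups such that:
--
--     Each group has exactly x cards where x > 1, and
--     All the cards in one group have the same integer written on them.
--     Return true if such partition is possible, or false otherwise.
--     """
--     if len(deck) < 2:
--         return False
--
--     count = [deck.count(i) for i in set(deck)]
--     result = count[0]
--
--     for i in count[1:]:
--         result = gcd(result, i)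
--
--     return result >= 2
--
-- def gcd(a: int, b: int) -> int:
--     while b != 0:
--         a, b = b, a % b
--     return a
-- ===== SOURCE B (Python) =====
-- def has_group_size_x(deck: list[int]) -> bool:
--     if len(deck) < 2:
--         return False
--     counts = {}
--     for c in deck:
--         counts[c] = counts.get(c, 0) + 1
--     vals = list(counts.values())
--     m = min(vals)
--     for x in range(2, m + 1):
--         if all(v % x == 0 for v in vals):
--             return True
--     return False
-- ===== Notes on version B (the rewrite author's own statement) =====
-- stated objective: faster
-- what changed: Replaces the per-distinct-value deck.count scans plus Euclidean-gcd fold by one counting pass into a dict followed by a trial-division search for a group size x in range(2, min(counts)+1) that divides every count.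
import Mathlib
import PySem

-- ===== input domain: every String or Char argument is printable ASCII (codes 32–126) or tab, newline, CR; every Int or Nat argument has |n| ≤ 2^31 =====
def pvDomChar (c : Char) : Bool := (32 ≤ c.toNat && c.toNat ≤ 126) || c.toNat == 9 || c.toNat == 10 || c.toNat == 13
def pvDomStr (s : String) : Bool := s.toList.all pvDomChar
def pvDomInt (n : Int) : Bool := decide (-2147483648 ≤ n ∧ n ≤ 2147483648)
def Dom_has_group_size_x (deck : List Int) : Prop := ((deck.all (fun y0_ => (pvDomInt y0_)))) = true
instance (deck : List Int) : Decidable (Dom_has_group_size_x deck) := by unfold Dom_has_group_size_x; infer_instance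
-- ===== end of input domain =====

-- B replaces A's Euclidean-gcd fold over the per-value counts by one counting pass into a
-- dict and a trial-division search for a common group size x in range(2, min(counts)+1).


-- ===== PORT A =====
-- termination fact the port's Euclidean loop cites: |a % b| < |b| for b ≠ 0 (Python mod)
theorem pymod_natAbs_lt (a b : Int) (h : b ≠ 0) : (PySem.Int.mod a b).natAbs < b.natAbs := by
  have he : PySem.Int.mod a b = Int.fmod a b := rfl
  rw [he, Int.fmod_eq_emod]
  have h1 : 0 ≤ a % b := Int.emod_nonneg a h
  rcases lt_or_gt_of_ne h with hb | hb
  · have h2 : a % b < -b := by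
      have hn : a % (-b) = a % b := Int.emod_neg a b
      have h3 := Int.emod_lt_of_pos a (show (0:Int) < -b by omega)
      omega
    split_ifs with hc
    · rcases hc with hc | hc
      · omega
      · have h0 : a % b = 0 := Int.emod_eq_zero_of_dvd hc
        omega
    · have h0 : a % b ≠ 0 := fun e => hc (Or.inr (Int.dvd_of_emod_eq_zero e))
      omega
  · have h2 : a % b < b := Int.emod_lt_of_pos a hb
    split_ifs with hc
    · omega
    · exact absurd (Or.inl hb.le) hc
-- port of the module-level helper gcd(a, b): while b != 0: a, b = b, a % b
def pygcd (a b : Int) : Int :=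
  if h : b = 0 then a else pygcd b (PySem.Int.mod a b)
termination_by b.natAbs
decreasing_by exact pymod_natAbs_lt a b h

def has_group_size_x (deck : List Int) : Bool :=
  if deck.length < 2 then false
  else
    let count := (PySem.Set.ofList deck).map (fun i => (PySem.List.count deck i : Int))
    match count with
    | [] => false   -- unreachable here: deck is nonempty, so count[0] raises only on []
    | result :: rest => decide (2 ≤ rest.foldl pygcd result)

-- ===== PORT B =====
def has_group_size_x_alt (deck : List Int) : Bool :=
  if deck.length < 2 then false
  else
    let counts := deck.foldl (fun d c => d.insert c (d.getD c 0 + 1)) PySem.Dict.empty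
    let vals := counts.values
    match PySem.List.min? vals (fun v => v) with
    | none => false  -- unreachable here: min([]) raises only when deck is empty
    | some m =>
      (PySem.List.pyRange 2 (m + 1) 1).any (fun x =>
        vals.all (fun v => PySem.Int.mod v x == 0))

-- ===== PRECONDITION & SPEC =====
def Spec_has_group_size_x (deck : List Int) (out : Bool) : Prop := out = has_group_size_x_alt deck
instance (deck : List Int) (out : Bool) : Decidable (Spec_has_group_size_x deck out) := by unfold Spec_has_group_size_x; infer_instance

-- ===== CLAIM (what is proved, stated in full; the proofs are below) =====
def Claim_equal_has_group_size_x : Prop := ∀ (deck : List Int), Dom_has_group_size_x deck → Spec_has_group_size_x deck (has_group_size_x deck)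

-- ===== LEMMAS AND PROOFS =====
-- pygcd on nonnegative inputs computes Nat.gcd
theorem pygcd_natCast (m n : Nat) : pygcd (m : Int) (n : Int) = (Nat.gcd m n : Int) := by
  induction n using Nat.strong_induction_on generalizing m with
  | _ n ih =>
    rcases Nat.eq_zero_or_pos n with h0 | hpos
    · subst h0; rw [pygcd]; simp
    · have hne : (n : Int) ≠ 0 := by exact_mod_cast hpos.ne'
      have hmod : PySem.Int.mod (m : Int) (n : Int) = ((m % n : Nat) : Int) := by
        have he : PySem.Int.mod (m : Int) (n : Int) = Int.fmod m n := rfl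
        rw [he, Int.fmod_eq_emod, if_pos (Or.inl (by positivity))]
        omega
      rw [pygcd, dif_neg hne, hmod, ih (m % n) (Nat.mod_lt _ hpos)]
      have hg : Nat.gcd n (m % n) = Nat.gcd m n := by
        conv_rhs => rw [Nat.gcd_comm, Nat.gcd_rec]
        exact Nat.gcd_comm _ _
      rw [hg]

-- the gcd fold divides its seed and every list element
theorem foldl_gcd_dvd (ns : List Nat) (init : Nat) :
    (ns.foldl Nat.gcd init ∣ init) ∧ (∀ v ∈ ns, ns.foldl Nat.gcd init ∣ v) := by
  induction ns generalizing init with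
  | nil => simp
  | cons c t ih =>
    have h := ih (Nat.gcd init c)
    refine ⟨h.1.trans (Nat.gcd_dvd_left _ _), ?_⟩
    intro v hv
    rcases List.mem_cons.mp hv with rfl | hv
    · exact h.1.trans (Nat.gcd_dvd_right _ _)
    · exact h.2 v hv

-- any common divisor of seed and elements divides the gcd fold
theorem dvd_foldl_gcd (ns : List Nat) (init x : Nat) (hi : x ∣ init) (h : ∀ v ∈ ns, x ∣ v) :
    x ∣ ns.foldl Nat.gcd init := by
  induction ns generalizing init with
  | nil => exact hi
  | cons c t ih =>
    exact ih (Nat.gcd init c) (Nat.dvd_gcd hi (h c List.mem_cons_self))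
      (fun v hv => h v (List.mem_cons_of_mem _ hv))

-- the pygcd fold over casts of naturals is the Nat.gcd fold
theorem foldl_pygcd_cast (t : List Nat) (c : Nat) :
    (t.map (Nat.cast : Nat → Int)).foldl pygcd (c : Int) = ((t.foldl Nat.gcd c : Nat) : Int) := by
  induction t generalizing c with
  | nil => rfl
  | cons a t ih => simp only [List.map_cons, List.foldl_cons, pygcd_natCast, ih]

-- the two ports agree on every input
theorem main_eq (deck : List Int) : has_group_size_x deck = has_group_size_x_alt deck := by
  by_cases hlen : deck.length < 2
  · simp [has_group_size_x, has_group_size_x_alt, hlen]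
  · have hnil : deck ≠ [] := by intro h; rw [h] at hlen; simp at hlen
    obtain ⟨k, ks, hk⟩ : ∃ k ks, PySem.Set.ofList deck = k :: ks := by
      cases hK : PySem.Set.ofList deck with
      | nil =>
        exfalso
        obtain ⟨d, ds, rfl⟩ := List.exists_cons_of_ne_nil hnil
        have : d ∈ PySem.Set.ofList (d :: ds) := (PySem.Set.mem_ofList _ _).mpr List.mem_cons_self
        rw [hK] at this; simp at this
      | cons a l => exact ⟨a, l, rfl⟩
    -- the Nat count list
    set c0 : Nat := deck.count k with hc0
    set t0 : List Nat := ks.map (fun i => deck.count i) with ht0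
    set g : Nat := t0.foldl Nat.gcd c0 with hg
    have hmemdeck : ∀ i ∈ k :: ks, i ∈ deck := by
      intro i hi
      exact (PySem.Set.mem_ofList _ _).mp (hk ▸ hi)
    have hpos : ∀ v ∈ c0 :: t0, 1 ≤ v := by
      intro v hv
      rcases List.mem_cons.mp hv with rfl | hv
      · exact List.count_pos_iff.mpr (hmemdeck k List.mem_cons_self)
      · rw [ht0] at hv
        obtain ⟨i, hi, rfl⟩ := List.mem_map.mp hv
        exact List.count_pos_iff.mpr (hmemdeck i (List.mem_cons_of_mem _ hi))
    have hgdvd : ∀ v ∈ c0 :: t0, g ∣ v := by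
      intro v hv
      rcases List.mem_cons.mp hv with rfl | hv
      · exact (foldl_gcd_dvd t0 c0).1
      · exact (foldl_gcd_dvd t0 c0).2 v hv
    have hgpos : 1 ≤ g := by
      rcases Nat.eq_zero_or_pos g with h0 | h
      · have hd := hgdvd c0 List.mem_cons_self
        rw [h0] at hd
        have h1 := Nat.eq_zero_of_zero_dvd hd
        have h2 := hpos c0 List.mem_cons_self
        omega
      · exact h
    -- A's value
    have hA : has_group_size_x deck = decide (2 ≤ (g : Int)) := by
      simp only [has_group_size_x, if_neg hlen, hk, List.map_cons, PySem.List.count_eq]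
      have hmm : ks.map (fun i => ((List.count i deck : Nat) : Int))
          = t0.map (Nat.cast : Nat → Int) := by
        rw [ht0, List.map_map]; rfl
      rw [hmm, show ((List.count k deck : Nat) : Int) = ((c0 : Nat) : Int) by rw [hc0],
        foldl_pygcd_cast, ← hg]
    -- B's values list
    have hvals : (deck.foldl (fun d c => d.insert c (d.getD c 0 + 1)) (PySem.Dict.empty : PySem.Dict Int Int)).values
        = (c0 :: t0).map (Nat.cast : Nat → Int) := by
      set d : PySem.Dict Int Int := deck.foldl (fun d c => d.insert c (d.getD c 0 + 1)) PySem.Dict.empty with hd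
      have hkeys : d.keys = k :: ks := by
        rw [hd, PySem.Dict.keys_foldl_insert, PySem.Dict.keys_empty, PySem.Set.update_nil_left, hk]
      have hnd : d.keys.Nodup := by
        rw [hd]; exact PySem.Dict.nodup_keys_foldl_insert _ _ _ (by simp [PySem.Dict.keys_empty])
      rw [PySem.Dict.values_eq_map_keys d hnd 0, hkeys]
      have hget : ∀ i : Int, d.getD i 0 = ((deck.count i : Nat) : Int) := by
        intro i
        rw [hd, PySem.Dict.getD_foldl_insert_add_one, PySem.Dict.getD_empty]
        simp [List.count]
      simp only [List.map_cons, hget, hc0, ht0, List.map_map]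
      rfl
    -- B's value
    rw [hA]
    simp only [has_group_size_x_alt, if_neg hlen, hvals]
    -- min? of a nonempty list
    cases hm : PySem.List.min? ((c0 :: t0).map (Nat.cast : Nat → Int)) (fun v => v) with
    | none =>
      exfalso
      have := (PySem.List.min?_eq_none_iff _ _).mp hm
      simp at this
    | some m =>
      have hmmem := PySem.List.min?_mem hm
      by_cases h2 : 2 ≤ g
      · rw [decide_eq_true (by exact_mod_cast h2)]
        symm
        rw [List.any_eq_true]
        refine ⟨(g : Int), ?_, ?_⟩
        · rw [PySem.List.mem_pyRange_one]
          obtain ⟨v0, hv0, hv0e⟩ := List.mem_map.mp hmmem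
          have hdv : g ∣ v0 := hgdvd v0 hv0
          have : g ≤ v0 := Nat.le_of_dvd (hpos v0 hv0) hdv
          constructor
          · exact_mod_cast h2
          · have : (g : Int) ≤ m := by rw [← hv0e]; exact_mod_cast this
            omega
        · rw [List.all_eq_true]
          intro v hv
          obtain ⟨v0, hv0, rfl⟩ := List.mem_map.mp hv
          rw [beq_iff_eq, PySem.Int.mod_eq_zero_iff_dvd]
          exact_mod_cast hgdvd v0 hv0
      · rw [decide_eq_false (by exact_mod_cast h2)]
        symm
        rw [List.any_eq_false]
        intro x hx
        rw [PySem.List.mem_pyRange_one] at hx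
        rw [Bool.not_eq_true, ← Bool.not_eq_true, List.all_eq_true]
        intro hall
        have hxd : ∀ v ∈ c0 :: t0, x.toNat ∣ v := by
          intro v hv
          have := hall ((v : Nat) : Int) (List.mem_map.mpr ⟨v, hv, rfl⟩)
          rw [beq_iff_eq, PySem.Int.mod_eq_zero_iff_dvd] at this
          have hx0 : ((x.toNat : Nat) : Int) = x := Int.toNat_of_nonneg (by omega)
          rw [← hx0] at this
          exact_mod_cast this
        have : x.toNat ∣ g := dvd_foldl_gcd t0 c0 x.toNat (hxd c0 List.mem_cons_self)
          (fun v hv => hxd v (List.mem_cons_of_mem _ hv))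
        have := Nat.le_of_dvd hgpos this
        omega

-- ===== VERDICT (by name: the statement is the Claim_ definition above) =====
theorem has_group_size_x_spec : Claim_equal_has_group_size_x := by
  intro deck _
  show _ = _
  exact main_eq deck
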